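-- pv_equiv track=rewrite | github.com/owais-ch/HashMap | Frequency_Game.py | LargButMinFreq
-- ===== SOURCE A (Python) =====
-- from collections import Counter
-- import math
--
-- def LargButMinFreq(arr,n):
--     dict1=Counter(arr)
--
--     max_freq=math.inf
--     maximum=-math.inf
--
--     for i in dict1:
--         if dict1[i]<max_freq:
--             maximum=i
--             max_freq=dict1[i]
--         elif dict1[i]==max_freq:
--             if i>maximum:
--                 maximum=i
--
--     return maximum
-- ===== SOURCE B (Python) =====
-- from collections import Counter
--
-- def LargButMinFreq(arr, n):
--     cnt = Counter(arr)
--     # invert the counter: frequency -> largest value having that frequency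
--     buckets = {}
--     for v, c in cnt.items():
--         if c not in buckets or v > buckets[c]:
--             buckets[c] = v
--     f = min(buckets)
--     return buckets[f]
-- ===== Notes on version B (the rewrite author's own statement) =====
-- stated objective: alternative
-- what changed: Instead of one scan tracking a running (min-frequency, max-value) pair, B inverts the counter into a frequency-keyed table holding the largest value per frequency, then selects the smallest frequency key and returns its recorded value.
-- outside the precondition, e.g. on LargButMinFreq([], 0): A returns -inf, B raises ValueError
import Mathlib
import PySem

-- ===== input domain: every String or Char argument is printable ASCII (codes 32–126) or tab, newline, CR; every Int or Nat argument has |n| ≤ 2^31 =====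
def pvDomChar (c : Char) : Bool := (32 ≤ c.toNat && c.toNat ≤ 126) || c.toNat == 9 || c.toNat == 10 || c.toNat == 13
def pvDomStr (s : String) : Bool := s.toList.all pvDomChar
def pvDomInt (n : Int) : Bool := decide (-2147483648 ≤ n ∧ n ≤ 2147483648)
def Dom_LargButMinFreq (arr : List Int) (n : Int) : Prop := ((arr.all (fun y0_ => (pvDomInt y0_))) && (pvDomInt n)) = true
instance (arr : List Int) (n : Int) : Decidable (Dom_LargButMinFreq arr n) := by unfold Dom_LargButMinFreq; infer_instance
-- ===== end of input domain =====

-- B replaces A's single min-tracking scan by a counter inverted into a frequency->max-value table,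
-- then a min over the frequency keys (objective: alternative decomposition; return value only, no mutation).

-- ===== PORT A =====
-- maximum = -math.inf / max_freq = math.inf are modelled as 'none' in the state
-- (any Int compares accordingly); the final 'none' case is unreachable for arr ≠ [].
def LargButMinFreq (arr : List Int) (n : Int) : Int :=
  let dict1 := PySem.Dict.counter arr
  let st := dict1.keys.foldl
    (fun (st : Option Int × Option Int) i =>
      match st.2 with
      | none => (some i, some (dict1.getD i 0))            -- dict1[i] < inf
      | some mf =>
        if dict1.getD i 0 < mf then (some i, some (dict1.getD i 0))
        else if dict1.getD i 0 = mf then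
          (match st.1 with
           | none => (some i, st.2)                         -- i > -inf
           | some mx => if i > mx then (some i, st.2) else st)
        else st)
    (none, none)
  match st.1 with
  | some m => m
  | none => 0                                               -- A returns -math.inf here (excluded by Pre_)

-- ===== PORT B =====
def LargButMinFreq_alt (arr : List Int) (n : Int) : Int :=
  let cnt := PySem.Dict.counter arr
  let buckets := cnt.items.foldl
    (fun (b : PySem.Dict Int Int) vc =>
      if !b.contains vc.2 || vc.1 > b.getD vc.2 0 then b.insert vc.2 vc.1 else b)
    PySem.Dict.empty
  let f := (PySem.List.min? buckets.keys (fun x => x)).getD 0   -- min(buckets); none (empty) excluded by Pre_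
  buckets.getD f 0

-- ===== PRECONDITION & SPEC =====
-- Pre_ excludes only the empty list, on which A returns the float -math.inf (not an int) and B raises ValueError.
def Pre_LargButMinFreq (arr : List Int) (n : Int) : Prop := arr ≠ []
instance (arr : List Int) (n : Int) : Decidable (Pre_LargButMinFreq arr n) := by unfold Pre_LargButMinFreq; infer_instance
def pvWitness_LargButMinFreq : List Int × Int := ([2, 2, 1, 1, 3], 5)

def Spec_LargButMinFreq (arr : List Int) (n : Int) (out : Int) : Prop := out = LargButMinFreq_alt arr n
instance (arr : List Int) (n : Int) (out : Int) : Decidable (Spec_LargButMinFreq arr n out) := by unfold Spec_LargButMinFreq; infer_instance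

-- ===== CLAIM (what is proved, stated in full; the proofs are below) =====
def Claim_equal_LargButMinFreq : Prop := ∀ (arr : List Int) (n : Int), Dom_LargButMinFreq arr n → Pre_LargButMinFreq arr n → Spec_LargButMinFreq arr n (LargButMinFreq arr n)

-- ===== LEMMAS AND PROOFS =====

-- A's loop body, over an abstract count function c
def pvStepA (c : Int → Int) (st : Option Int × Option Int) (i : Int) : Option Int × Option Int :=
  match st.2 with
  | none => (some i, some (c i))
  | some mf =>
    if c i < mf then (some i, some (c i))
    else if c i = mf then
      (match st.1 with
       | none => (some i, st.2)
       | some mx => if i > mx then (some i, st.2) else st)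
    else st

-- B's loop body
def pvStepB (b : PySem.Dict Int Int) (p : Int × Int) : PySem.Dict Int Int :=
  if !b.contains p.2 || p.1 > b.getD p.2 0 then b.insert p.2 p.1 else b

-- the invariant tying A's running pair to B's bucket table
def pvInv (st : Option Int × Option Int) (b : PySem.Dict Int Int) : Prop :=
  (st = (none, none) ∧ b = PySem.Dict.empty) ∨
  (∃ m, PySem.List.min? b.keys (fun x => x) = some m ∧ st = (some (b.getD m 0), some m))

-- min? with identity key is characterised by membership + lower bound (Int keys)
theorem pv_min_char (l : List Int) (m : Int) (hm : m ∈ l) (hlb : ∀ y ∈ l, m ≤ y) :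
    PySem.List.min? l (fun x => x) = some m := by
  have hne : l ≠ [] := by rintro rfl; exact absurd hm (by simp)
  obtain ⟨m0, hm0⟩ : ∃ m0, PySem.List.min? l (fun x => x) = some m0 := by
    cases h : PySem.List.min? l (fun x => x) with
    | none => exact absurd ((PySem.List.min?_eq_none_iff l (fun x => x)).mp h) hne
    | some m0 => exact ⟨m0, rfl⟩
  have h1 : m0 ∈ l := PySem.List.min?_mem hm0
  have h2 : ∀ y ∈ l, m0 ≤ y := PySem.List.min?_isMin hm0
  have : m0 = m := le_antisymm (h2 m hm) (hlb m0 h1)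
  rw [hm0, this]

theorem pv_step_inv (c : Int → Int) (st : Option Int × Option Int) (b : PySem.Dict Int Int)
    (h : pvInv st b) : pvInv (pvStepA c st i) (pvStepB b (i, c i)) := by
  rcases h with ⟨hst, hb⟩ | ⟨m, hmin, hst⟩
  · subst hst; subst hb
    right
    refine ⟨c i, ?_, ?_⟩
    · simp [pvStepB, PySem.Dict.contains_empty, PySem.Dict.keys_insert_of_not_contains,
            PySem.Dict.keys_empty, PySem.List.min?_id_cons]
    · simp [pvStepA, pvStepB, PySem.Dict.contains_empty, PySem.Dict.getD_insert_self]
  · subst hst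
    have hmem : m ∈ b.keys := PySem.List.min?_mem hmin
    have hlb : ∀ y ∈ b.keys, m ≤ y := PySem.List.min?_isMin hmin
    rcases lt_trichotomy (c i) m with hlt | heq | hgt
    · -- new strictly smaller frequency: both switch to (i, c i)
      have hnc : b.contains (c i) = false := by
        by_contra h
        have : c i ∈ b.keys := (PySem.Dict.contains_iff_mem_keys _ _).mp (by simpa using h)
        exact absurd (hlb _ this) (not_le.mpr hlt)
      right
      refine ⟨c i, ?_, ?_⟩
      · rw [pvStepB]; simp only [hnc, Bool.not_false, Bool.true_or, if_true]
        rw [PySem.Dict.keys_insert_of_not_contains _ _ hnc]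
        exact pv_min_char _ _ (by simp) (by
          intro y hy
          rcases List.mem_append.mp hy with hy | hy
          · exact le_trans hlt.le (hlb y hy)
          · simp at hy; omega)
      · rw [pvStepA, pvStepB]
        simp [hnc, hlt, PySem.Dict.getD_insert_self]
    · -- equal frequency: A keeps the larger value; B updates the bucket the same way
      subst heq
      have hc : b.contains (c i) = true := (PySem.Dict.contains_iff_mem_keys _ _).mpr hmem
      by_cases hgtv : i > b.getD (c i) 0
      · right
        refine ⟨c i, ?_, ?_⟩
        · rw [pvStepB]; simp only [hc, Bool.not_true, Bool.false_or, hgtv, decide_true, if_true]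
          rw [PySem.Dict.keys_insert_of_contains _ _ hc]
          exact hmin
        · rw [pvStepA, pvStepB]
          simp [hc, hgtv, PySem.Dict.getD_insert_self]
      · have hBi : pvStepB b (i, c i) = b := by rw [pvStepB]; simp [hc, hgtv]
        have hAi : pvStepA c (some (b.getD (c i) 0), some (c i)) i
            = (some (b.getD (c i) 0), some (c i)) := by
          rw [pvStepA]; simp [hgtv]
        rw [hAi, hBi]; exact Or.inr ⟨c i, hmin, rfl⟩
    · -- larger frequency: min bucket untouched, A keeps its state
      have hAi : pvStepA c (some (b.getD m 0), some m) i = (some (b.getD m 0), some m) := by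
        rw [pvStepA]; simp [not_lt.mpr hgt.le, ne_of_gt hgt]
      rw [hAi]
      have hne : m ≠ c i := ne_of_lt hgt
      right
      by_cases hc : b.contains (c i) = true
      · by_cases hv : i > b.getD (c i) 0
        · have hBi : pvStepB b (i, c i) = b.insert (c i) i := by
            rw [pvStepB]; simp [hc, hv]
          refine ⟨m, ?_, ?_⟩
          · rw [hBi, PySem.Dict.keys_insert_of_contains _ _ hc]; exact hmin
          · rw [hBi, PySem.Dict.getD_insert_of_ne _ _ _ hne]
        · have hBi : pvStepB b (i, c i) = b := by rw [pvStepB]; simp [hc, hv]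
          rw [hBi]; exact ⟨m, hmin, rfl⟩
      · simp only [Bool.not_eq_true] at hc
        have hBi : pvStepB b (i, c i) = b.insert (c i) i := by rw [pvStepB]; simp [hc]
        refine ⟨m, ?_, ?_⟩
        · rw [hBi, PySem.Dict.keys_insert_of_not_contains _ _ hc]
          exact pv_min_char _ _ (by simp [hmem]) (by
            intro y hy
            rcases List.mem_append.mp hy with hy | hy
            · exact hlb y hy
            · simp at hy; omega)
        · rw [hBi, PySem.Dict.getD_insert_of_ne _ _ _ hne]

theorem pv_fold_inv (c : Int → Int) (S : List Int) (st : Option Int × Option Int)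
    (b : PySem.Dict Int Int) (h : pvInv st b) :
    pvInv (S.foldl (pvStepA c) st) (S.foldl (fun b k => pvStepB b (k, c k)) b) := by
  induction S generalizing st b with
  | nil => exact h
  | cons x t ih => exact ih _ _ (pv_step_inv c st b h)

theorem pv_snd_isSome (c : Int → Int) (S : List Int) (st : Option Int × Option Int)
    (h : st.2.isSome) : (S.foldl (pvStepA c) st).2.isSome := by
  induction S generalizing st with
  | nil => exact h
  | cons x t ih =>
    refine ih _ ?_
    rcases st with ⟨mx, mf⟩
    cases mf with
    | none => simp at h
    | some f =>
      rw [pvStepA]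
      dsimp only
      split_ifs <;> cases mx <;> simp <;> split_ifs <;> simp

-- ===== VERDICT (by name: the statement is the Claim_ definition above) =====
theorem LargButMinFreq_spec : Claim_equal_LargButMinFreq := by
  intro arr n _ hpre
  unfold Spec_LargButMinFreq LargButMinFreq LargButMinFreq_alt
  have hA : (fun (st : Option Int × Option Int) i =>
      match st.2 with
      | none => (some i, some ((PySem.Dict.counter arr).getD i 0))
      | some mf =>
        if (PySem.Dict.counter arr).getD i 0 < mf then (some i, some ((PySem.Dict.counter arr).getD i 0))
        else if (PySem.Dict.counter arr).getD i 0 = mf then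
          (match st.1 with
           | none => (some i, st.2)
           | some mx => if i > mx then (some i, st.2) else st)
        else st) = pvStepA (fun i => ((arr.count i : Int))) := by
    funext st i
    rcases st with ⟨mx, mf⟩
    cases mf <;> simp [pvStepA, PySem.Dict.getD_counter]
  have hB : (fun (b : PySem.Dict Int Int) (vc : Int × Int) =>
      if !b.contains vc.2 || vc.1 > b.getD vc.2 0 then b.insert vc.2 vc.1 else b) = pvStepB := by
    funext b vc; rfl
  simp only [hA, hB, PySem.Dict.keys_counter, PySem.Dict.items_counter, List.foldl_map]
  set S := PySem.Set.ofList arr with hS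
  set c := fun i => ((arr.count i : Int)) with hc
  have hSne : (S : List Int) ≠ [] := by
    rcases arr with _ | ⟨x, t⟩
    · exact absurd rfl hpre
    · intro h
      have : x ∈ (S : List Int) := by rw [hS]; exact (PySem.Set.mem_ofList _ _).mpr (by simp)
      rw [h] at this; simp at this
  have hinv := pv_fold_inv c S (none, none) PySem.Dict.empty (Or.inl ⟨rfl, rfl⟩)
  rcases hinv with ⟨h1, _⟩ | ⟨m, hmin, hst⟩
  · -- impossible: S ≠ [] so the fold's snd is some
    rcases S with _ | ⟨x, t⟩
    · exact absurd rfl hSne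
    · have := pv_snd_isSome c t (pvStepA c (none, none) x) (by rw [pvStepA]; simp)
      rw [List.foldl_cons] at h1
      rw [h1] at this
      simp at this
  · rw [hst, hmin]
    simp only [Option.getD_some]
    rfl
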